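-- pv_equiv track=rewrite | github.com/aag147/rcnn | shared/utils.py | getBareBonesStats
-- ===== SOURCE A (Python) =====
-- def getBareBonesStats(labels):
--     stats = {}
--     for label in labels:
--         obj = label['obj']; pred = label['pred']
--         if obj not in stats:
--             stats[obj] = {'total': 0}
--         if pred not in stats[obj]:
--             stats[obj][pred] =  0
-- #            stats[obj][pred+'conf'] =  0
--     return stats
-- ===== SOURCE B (Python) =====
-- def getBareBonesStats(labels):
--     # Pass 1: distinct objects in order of first appearance.
--     objs = []
--     for label in labels:
--         if label['obj'] not in objs:
--             objs.append(label['obj'])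
--     # Pass 2: for each object, rescan the labels collecting its preds.
--     stats = {}
--     for obj in objs:
--         inner = {'total': 0}
--         for label in labels:
--             if label['obj'] == obj:
--                 inner[label['pred']] = 0
--         stats[obj] = inner
--     return stats
-- ===== Notes on version B (the rewrite author's own statement) =====
-- stated objective: alternative
-- what changed: Replaces A's single interleaved pass maintaining the nested dict with membership tests by a group-by-rescan scheme: first collect the distinct objects in appearance order, then for each object rescan the label list, building its inner dict by unconditional zero-assignment; correct because every stored value is 0, so overwrites are harmless and only key order matters.
import Mathlib
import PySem

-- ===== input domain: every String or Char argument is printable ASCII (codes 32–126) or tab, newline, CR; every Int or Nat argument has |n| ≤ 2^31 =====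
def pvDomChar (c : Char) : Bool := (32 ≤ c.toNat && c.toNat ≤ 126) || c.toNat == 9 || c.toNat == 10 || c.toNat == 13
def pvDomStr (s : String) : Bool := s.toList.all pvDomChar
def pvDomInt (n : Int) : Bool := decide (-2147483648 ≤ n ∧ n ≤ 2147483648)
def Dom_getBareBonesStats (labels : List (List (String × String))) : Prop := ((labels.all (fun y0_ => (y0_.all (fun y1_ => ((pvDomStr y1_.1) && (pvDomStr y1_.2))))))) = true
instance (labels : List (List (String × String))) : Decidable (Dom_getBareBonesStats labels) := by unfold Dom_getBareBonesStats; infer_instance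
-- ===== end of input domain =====

-- B collects the distinct objects first and then rescans the labels once per object; same return value as A.

-- ===== PORT A =====
-- one loop iteration of A: obj = label['obj']; pred = label['pred'];
-- if obj not in stats: stats[obj] = {'total': 0}; if pred not in stats[obj]: stats[obj][pred] = 0
-- (the `_, _ => stats` arm is the KeyError case, excluded by Pre_)
def pvStepA (stats : PySem.Dict String (PySem.Dict String Int)) (label : List (String × String)) :
    PySem.Dict String (PySem.Dict String Int) :=
  match (PySem.Dict.mk label).get? "obj", (PySem.Dict.mk label).get? "pred" with
  | some obj, some pred =>
    let stats1 := if stats.contains obj then stats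
                  else stats.insert obj (PySem.Dict.mk [("total", (0 : Int))])
    let inner := stats1.getD obj PySem.Dict.empty
    if inner.contains pred then stats1 else stats1.insert obj (inner.insert pred 0)
  | _, _ => stats

def getBareBonesStats (labels : List (List (String × String))) : List (String × List (String × Int)) :=
  ((labels.foldl pvStepA PySem.Dict.empty).items).map (fun p => (p.1, p.2.items))

-- ===== PORT B =====
-- pass 1 iteration: if label['obj'] not in objs: objs.append(label['obj'])
-- (the `none => objs` arm is the KeyError case, excluded by Pre_)
def pvObjsStep (objs : List String) (label : List (String × String)) : List String :=
  match (PySem.Dict.mk label).get? "obj" with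
  | some obj => if obj ∈ objs then objs else objs ++ [obj]
  | none => objs

-- pass 2 inner-loop iteration for a fixed obj: if label['obj'] == obj: inner[label['pred']] = 0
def pvInnerStep (obj : String) (d : PySem.Dict String Int) (label : List (String × String)) :
    PySem.Dict String Int :=
  match (PySem.Dict.mk label).get? "obj" with
  | some o =>
    if o == obj then
      match (PySem.Dict.mk label).get? "pred" with
      | some p => d.insert p 0
      | none => d
    else d
  | none => d

-- pass 2 body for one obj: inner = {'total': 0}; for label in labels: …
def pvInner (labels : List (List (String × String))) (obj : String) : PySem.Dict String Int :=
  labels.foldl (pvInnerStep obj) (PySem.Dict.mk [("total", (0 : Int))])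

def getBareBonesStats_alt (labels : List (List (String × String))) : List (String × List (String × Int)) :=
  (((labels.foldl pvObjsStep []).foldl (fun r obj => r.insert obj (pvInner labels obj))
      PySem.Dict.empty).items).map (fun p => (p.1, p.2.items))

-- ===== PRECONDITION & SPEC =====
-- Pre_ excludes exactly the labels missing an 'obj' or 'pred' key, on which A raises KeyError.
def Pre_getBareBonesStats (labels : List (List (String × String))) : Prop :=
  ∀ label ∈ labels, ((PySem.Dict.mk label).get? "obj").isSome ∧ ((PySem.Dict.mk label).get? "pred").isSome
instance (labels : List (List (String × String))) : Decidable (Pre_getBareBonesStats labels) := by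
  unfold Pre_getBareBonesStats; infer_instance

def pvWitness_getBareBonesStats : (List (List (String × String))) :=
  [[("obj", "a"), ("pred", "p")], [("obj", "a"), ("pred", "total")]]

def Spec_getBareBonesStats (labels : List (List (String × String))) (out : List (String × List (String × Int))) : Prop := out = getBareBonesStats_alt labels
instance (labels : List (List (String × String))) (out : List (String × List (String × Int))) : Decidable (Spec_getBareBonesStats labels out) := by unfold Spec_getBareBonesStats; infer_instance

-- ===== CLAIM (what is proved, stated in full; the proofs are below) =====
def Claim_equal_getBareBonesStats : Prop := ∀ (labels : List (List (String × String))), Dom_getBareBonesStats labels → Pre_getBareBonesStats labels → Spec_getBareBonesStats labels (getBareBonesStats labels)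

-- ===== LEMMAS AND PROOFS =====

theorem pv_insert_same {κ ν : Type} [BEq κ] [LawfulBEq κ] (d : PySem.Dict κ ν) (k : κ) (v : ν)
    (hnd : d.keys.Nodup) (hm : (k, v) ∈ d.items) : d.insert k v = d := by
  have hc : d.contains k = true := by
    rw [PySem.Dict.contains_iff_mem_keys]; exact PySem.Dict.mem_keys_of_mem_items _ hm
  apply PySem.Dict.ext
  rw [PySem.Dict.items_insert_of_contains _ _ hc]
  conv_rhs => rw [← List.map_id d.items]
  apply List.map_congr_left
  intro p hp
  by_cases h : p.1 = k
  · simp only [h, BEq.rfl, if_true]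
    have h1 := PySem.Dict.get?_of_mem_items _ hm hnd
    have h2 := PySem.Dict.get?_of_mem_items _ (show (k, p.2) ∈ d.items from h ▸ hp) hnd
    have h3 : p.2 = v := by rw [h1] at h2; exact Option.some_inj.mp h2.symm
    rw [← h, ← h3]; rfl
  · simp [h]

theorem pv_mem_zero (d : PySem.Dict String Int) (k : String)
    (hc : d.contains k = true) (hz : ∀ q ∈ d.items, q.2 = 0) : (k, (0:Int)) ∈ d.items := by
  rw [PySem.Dict.contains_eq_isSome_get?] at hc
  obtain ⟨v, hv⟩ := Option.isSome_iff_exists.mp hc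
  have hm := PySem.Dict.mem_items_of_get?_eq_some _ hv
  have := hz (k, v) hm
  rw [← this]; exact hm

-- reductions of the two loop bodies once the label's keys are known to be present
theorem pvObjsStep_some (objs : List String) (label : List (String × String)) (o : String)
    (h : (PySem.Dict.mk label).get? "obj" = some o) :
    pvObjsStep objs label = if o ∈ objs then objs else objs ++ [o] := by
  unfold pvObjsStep; rw [h]

theorem pvInnerStep_some (obj : String) (d : PySem.Dict String Int)
    (label : List (String × String)) (o p : String)
    (ho : (PySem.Dict.mk label).get? "obj" = some o)
    (hp : (PySem.Dict.mk label).get? "pred" = some p) :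
    pvInnerStep obj d label = if o == obj then d.insert p 0 else d := by
  unfold pvInnerStep; rw [ho]
  by_cases h : (o == obj) = true
  · simp only [h, if_true]; rw [hp]
  · simp [h]

-- pass-1 list of objects: no duplicates
theorem pv_objs_nodup (labels : List (List (String × String))) :
    ∀ acc : List String, acc.Nodup → (labels.foldl pvObjsStep acc).Nodup := by
  induction labels with
  | nil => intro acc h; exact h
  | cons l ls ih =>
    intro acc h
    refine ih _ ?_
    unfold pvObjsStep
    cases (PySem.Dict.mk l).get? "obj" with
    | none => exact h
    | some o =>
      by_cases hm : o ∈ acc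
      · simpa [hm] using h
      · simpa [hm] using List.Nodup.append h (List.nodup_singleton o) (by simpa using hm)

-- membership in the pass-1 list = the object occurs in some label
theorem pv_mem_objs (labels : List (List (String × String))) :
    ∀ (acc : List String) (o : String),
      o ∈ labels.foldl pvObjsStep acc ↔
        o ∈ acc ∨ ∃ lab ∈ labels, (PySem.Dict.mk lab).get? "obj" = some o := by
  induction labels with
  | nil => intro acc o; simp
  | cons l ls ih =>
    intro acc o
    rw [List.foldl_cons, ih]
    cases h : (PySem.Dict.mk l).get? "obj" with
    | none =>
      have hstep : pvObjsStep acc l = acc := by unfold pvObjsStep; rw [h]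
      rw [hstep]
      constructor
      · rintro (h1 | ⟨lab, hl, he⟩)
        · exact Or.inl h1
        · exact Or.inr ⟨lab, List.mem_cons_of_mem _ hl, he⟩
      · rintro (h1 | ⟨lab, hl, he⟩)
        · exact Or.inl h1
        · rcases List.mem_cons.mp hl with rfl | hl'
          · rw [h] at he; cases he
          · exact Or.inr ⟨lab, hl', he⟩
    | some ol =>
      rw [pvObjsStep_some acc l ol h]
      by_cases hm : ol ∈ acc
      · rw [if_pos hm]
        constructor
        · rintro (h1 | ⟨lab, hl, he⟩)
          · exact Or.inl h1
          · exact Or.inr ⟨lab, List.mem_cons_of_mem _ hl, he⟩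
        · rintro (h1 | ⟨lab, hl, he⟩)
          · exact Or.inl h1
          · rcases List.mem_cons.mp hl with rfl | hl'
            · rw [h] at he; cases he; exact Or.inl hm
            · exact Or.inr ⟨lab, hl', he⟩
      · rw [if_neg hm]
        constructor
        · rintro (h1 | ⟨lab, hl, he⟩)
          · rcases List.mem_append.mp h1 with h2 | h2
            · exact Or.inl h2
            · exact Or.inr ⟨l, List.mem_cons_self, by rw [h, List.mem_singleton.mp h2]⟩
          · exact Or.inr ⟨lab, List.mem_cons_of_mem _ hl, he⟩
        · rintro (h1 | ⟨lab, hl, he⟩)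
          · exact Or.inl (List.mem_append.mpr (Or.inl h1))
          · rcases List.mem_cons.mp hl with rfl | hl'
            · rw [h] at he; cases he
              exact Or.inl (List.mem_append.mpr (Or.inr (List.mem_singleton.mpr rfl)))
            · exact Or.inr ⟨lab, hl', he⟩

-- inner-dict invariant: unique keys, all values 0, preserved by pass 2's inner loop
theorem pv_inner_inv (labels : List (List (String × String))) (obj : String) :
    ∀ d : PySem.Dict String Int, d.keys.Nodup → (∀ q ∈ d.items, q.2 = 0) →
      (labels.foldl (pvInnerStep obj) d).keys.Nodup ∧
        ∀ q ∈ (labels.foldl (pvInnerStep obj) d).items, q.2 = 0 := by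
  induction labels with
  | nil => intro d h1 h2; exact ⟨h1, h2⟩
  | cons l ls ih =>
    intro d h1 h2
    rw [List.foldl_cons]
    refine ih _ ?_ ?_
    · unfold pvInnerStep
      cases (PySem.Dict.mk l).get? "obj" with
      | none => exact h1
      | some o =>
        by_cases ho : (o == obj) = true
        · cases (PySem.Dict.mk l).get? "pred" with
          | none => simpa [ho] using h1
          | some p => simpa [ho] using PySem.Dict.nodup_keys_insert _ _ _ h1
        · simpa [ho] using h1
    · unfold pvInnerStep
      cases (PySem.Dict.mk l).get? "obj" with
      | none => exact h2
      | some o =>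
        by_cases ho : (o == obj) = true
        · cases (PySem.Dict.mk l).get? "pred" with
          | none => simpa [ho] using h2
          | some p =>
            simp only [ho, if_true]
            intro q hq
            rcases (PySem.Dict.mem_items_insert _ _ _ _).mp hq with h | ⟨h, _⟩
            · rw [h]
            · exact h2 q h
        · simpa [ho] using h2
  
theorem pv_inner_nodup (labels : List (List (String × String))) (obj : String) :
    (pvInner labels obj).keys.Nodup :=
  (pv_inner_inv labels obj _ (by decide) (by decide)).1

theorem pv_inner_zero (labels : List (List (String × String))) (obj : String) :
    ∀ q ∈ (pvInner labels obj).items, q.2 = 0 :=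
  (pv_inner_inv labels obj _ (by decide) (by decide)).2

-- the inner loop skips labels of other objects entirely
theorem pv_inner_fresh (labels : List (List (String × String))) (obj : String)
    (h : ∀ lab ∈ labels, (PySem.Dict.mk lab).get? "obj" ≠ some obj) :
    ∀ d : PySem.Dict String Int, labels.foldl (pvInnerStep obj) d = d := by
  induction labels with
  | nil => intro d; rfl
  | cons l ls ih =>
    intro d
    rw [List.foldl_cons]
    have hstep : pvInnerStep obj d l = d := by
      unfold pvInnerStep
      cases hl : (PySem.Dict.mk l).get? "obj" with
      | none => rfl
      | some o =>
        have hne : o ≠ obj := fun he => h l List.mem_cons_self (by rw [hl, he])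
        simp [hne]
    rw [hstep]
    exact ih (fun lab hm => h lab (List.mem_cons_of_mem _ hm)) d

-- MAIN: A's fold has exactly the items B assembles (objs in appearance order, pvInner per obj)
theorem pv_main (labels : List (List (String × String))) (hpre : Pre_getBareBonesStats labels) :
    (labels.foldl pvStepA PySem.Dict.empty).items =
      (labels.foldl pvObjsStep []).map (fun o => (o, pvInner labels o)) := by
  induction labels using List.reverseRecOn with
  | nil => rfl
  | append_singleton L l ih =>
    have hpreL : Pre_getBareBonesStats L := fun lab hm => hpre lab (by simp [hm])
    obtain ⟨hobj, hpred⟩ := hpre l (by simp)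
    obtain ⟨o, ho⟩ := Option.isSome_iff_exists.mp hobj
    obtain ⟨p, hp⟩ := Option.isSome_iff_exists.mp hpred
    have IH := ih hpreL
    set S := L.foldl pvStepA PySem.Dict.empty with hS
    have hnodobjs : (L.foldl pvObjsStep []).Nodup := pv_objs_nodup L [] List.nodup_nil
    have hkeys : S.keys = L.foldl pvObjsStep [] := by
      show S.items.map (·.1) = _
      rw [IH, List.map_map]
      exact List.map_id' (L.foldl pvObjsStep [])
    have hnodS : S.keys.Nodup := by rw [hkeys]; exact hnodobjs
    -- per-object value of pvInner on L ++ [l]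
    have hInnerApp : ∀ o' : String, pvInner (L ++ [l]) o' = pvInnerStep o' (pvInner L o') l := by
      intro o'; unfold pvInner; rw [List.foldl_append, List.foldl_cons, List.foldl_nil]
    have hInnerNe : ∀ o' : String, o' ≠ o → pvInner (L ++ [l]) o' = pvInner L o' := by
      intro o' hne
      rw [hInnerApp, pvInnerStep_some o' _ l o p ho hp,
        if_neg (by simp only [beq_iff_eq]; exact fun h => hne h.symm)]
    have hInnerEq : pvInner (L ++ [l]) o = (pvInner L o).insert p 0 := by
      rw [hInnerApp, pvInnerStep_some o _ l o p ho hp, if_pos (by simp)]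
    have hObjsApp : (L ++ [l]).foldl pvObjsStep [] = pvObjsStep (L.foldl pvObjsStep []) l := by
      rw [List.foldl_append, List.foldl_cons, List.foldl_nil]
    rw [List.foldl_append, List.foldl_cons, List.foldl_nil, ← hS, hObjsApp]
    by_cases hmem : o ∈ L.foldl pvObjsStep []
    · -- o already seen: objs list unchanged, only o's inner entry may change
      have hoacc : pvObjsStep (L.foldl pvObjsStep []) l = L.foldl pvObjsStep [] := by
        rw [pvObjsStep_some _ l o ho, if_pos hmem]
      rw [hoacc]
      have hmemS : (o, pvInner L o) ∈ S.items := by rw [IH]; exact List.mem_map_of_mem hmem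
      have hcont : S.contains o = true := by
        rw [PySem.Dict.contains_iff_mem_keys]; exact PySem.Dict.mem_keys_of_mem_items _ hmemS
      have hgetD : S.getD o PySem.Dict.empty = pvInner L o :=
        PySem.Dict.getD_of_mem_items S hmemS hnodS _
      have hstep : pvStepA S l = S.insert o ((pvInner L o).insert p 0) := by
        unfold pvStepA
        rw [ho, hp]
        simp only [hcont, if_true, hgetD]
        by_cases hpc : (pvInner L o).contains p = true
        · rw [if_pos hpc]
          rw [pv_insert_same _ p 0 (pv_inner_nodup L o) (pv_mem_zero _ p hpc (pv_inner_zero L o))]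
          rw [pv_insert_same S o (pvInner L o) hnodS hmemS]
        · rw [if_neg (by simp [hpc])]
      rw [hstep, PySem.Dict.items_insert_of_contains _ _ hcont, IH, List.map_map]
      apply List.map_congr_left
      intro o' ho'
      by_cases he : o' = o
      · subst he; simp [hInnerEq]
      · have : (o' == o) = false := by simp [he]
        simp [Function.comp, this, hInnerNe o' he]
    · -- o is new: appended to objs, fresh entry appended to the dict
      have hoacc : pvObjsStep (L.foldl pvObjsStep []) l = L.foldl pvObjsStep [] ++ [o] := by
        rw [pvObjsStep_some _ l o ho, if_neg hmem]
      rw [hoacc]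
      have hcont : S.contains o = false := by
        rw [← Bool.not_eq_true, PySem.Dict.contains_iff_mem_keys, hkeys]; exact hmem
      have hInnerLo : pvInner L o = PySem.Dict.mk [("total", (0:Int))] := by
        unfold pvInner
        exact pv_inner_fresh L o
          (fun lab hm he => hmem ((pv_mem_objs L [] o).mpr (Or.inr ⟨lab, hm, he⟩))) _
      have hstep : pvStepA S l = S.insert o ((PySem.Dict.mk [("total", (0:Int))]).insert p 0) := by
        unfold pvStepA
        rw [ho, hp]
        simp only [hcont, Bool.false_eq_true, if_false, PySem.Dict.getD_insert_self]
        by_cases hpt : ((PySem.Dict.mk [("total", (0:Int))]).contains p) = true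
        · have hpe : p = "total" := by
            have h2 := (PySem.Dict.contains_iff_mem_keys _ _).mp hpt
            simpa using h2
          rw [if_pos hpt, hpe]
          rw [pv_insert_same (PySem.Dict.mk [("total", (0:Int))]) "total" 0 (by decide) (by decide)]
        · rw [if_neg (by simp [hpt]), PySem.Dict.insert_insert_self]
      rw [hstep,
        PySem.Dict.items_insert_of_not_contains _ _ hcont, IH, List.map_append]
      congr 1
      · apply List.map_congr_left
        intro o' ho'
        have hne : o' ≠ o := fun he => hmem (he ▸ ho')
        rw [hInnerNe o' hne]
      · simp [hInnerEq, hInnerLo]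

-- B's pass-2 outer loop over distinct fresh keys just appends its entries
theorem pv_alt_items (labels : List (List (String × String))) :
    ((labels.foldl pvObjsStep []).foldl
        (fun r obj => r.insert obj (pvInner labels obj)) PySem.Dict.empty).items =
      (labels.foldl pvObjsStep []).map (fun o => (o, pvInner labels o)) := by
  have h := PySem.Dict.items_foldl_insert_fresh (l := labels.foldl pvObjsStep [])
      (k := fun o => o) (v := fun o => pvInner labels o) (d := PySem.Dict.empty)
      (by intro a _; exact PySem.Dict.contains_empty _) (by simpa using pv_objs_nodup labels [] List.nodup_nil)
  simpa using h

-- ===== VERDICT (by name: the statement is the Claim_ definition above) =====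
theorem getBareBonesStats_spec : Claim_equal_getBareBonesStats := by
  intro labels _ hpre
  unfold Spec_getBareBonesStats getBareBonesStats getBareBonesStats_alt
  rw [pv_main labels hpre, pv_alt_items labels]
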